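-- pv_equiv track=rewrite | github.com/richieBao/YingZao_PyPI | src/yingzao/ancientArchi/Gong/HuaGong_MatchedChaAng_4PU.py | broadcast_branches
-- ===== SOURCE A (Python) =====
-- def broadcast_branches(branches, n_branches):
--     """将分支列表广播到 n_branches（不足重复最后一个分支）。"""
--     if n_branches <= 0:
--         return []
--     if not branches:
--         return [[] for _ in range(n_branches)]
--     if len(branches) >= n_branches:
--         return branches[:n_branches]
--     return branches + [branches[-1]] * (n_branches - len(branches))
-- ===== SOURCE B (Python) =====
-- def broadcast_branches(branches, n_branches):
--     out = []
--     last = len(branches) - 1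
--     for i in range(n_branches):
--         if not branches:
--             out.append([])
--         else:
--             out.append(branches[min(i, last)])
--     return out
-- ===== Notes on version B (the rewrite author's own statement) =====
-- stated objective: simpler
-- what changed: B replaces A's four-way case split (empty result, list of fresh empties, slice truncation, concat with a replicated last element) by one uniform loop over range(n_branches) that appends one element per index with a min-clamp into branches.
import Mathlib
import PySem

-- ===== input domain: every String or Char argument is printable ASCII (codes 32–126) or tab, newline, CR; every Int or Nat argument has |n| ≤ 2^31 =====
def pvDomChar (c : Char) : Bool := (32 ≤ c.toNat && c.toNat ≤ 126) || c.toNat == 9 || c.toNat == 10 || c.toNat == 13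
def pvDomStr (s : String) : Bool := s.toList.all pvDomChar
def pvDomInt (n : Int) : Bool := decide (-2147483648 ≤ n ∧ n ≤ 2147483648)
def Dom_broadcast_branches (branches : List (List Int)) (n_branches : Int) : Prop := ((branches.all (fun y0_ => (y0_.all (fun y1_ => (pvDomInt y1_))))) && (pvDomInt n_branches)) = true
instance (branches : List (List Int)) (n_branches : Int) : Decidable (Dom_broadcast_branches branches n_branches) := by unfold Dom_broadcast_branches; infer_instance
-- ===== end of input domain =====

-- B builds the result with one loop over range(n_branches), clamping the index into branches,
-- instead of A's four-way case split; equal cost, simpler shape.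
-- ===== PORT A =====
def broadcast_branches (branches : List (List Int)) (n_branches : Int) : List (List Int) :=
  if n_branches ≤ 0 then []
  else if branches = [] then (PySem.List.pyRange 0 n_branches 1).map (fun _ => ([] : List Int))
  else if (branches.length : Int) ≥ n_branches then PySem.List.slice branches none (some n_branches)
  -- branches[-1]: branches is nonempty on this path, so pyGetD with default [] is exact
  else branches ++ List.replicate (n_branches - (branches.length : Int)).toNat (PySem.List.pyGetD branches (-1) [])

-- ===== PORT B =====
def broadcast_branches_alt (branches : List (List Int)) (n_branches : Int) : List (List Int) :=
  (PySem.List.pyRange 0 n_branches 1).foldl (fun out i =>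
    out ++ [if branches = [] then ([] : List Int)
            else PySem.List.pyGetD branches (min i ((branches.length : Int) - 1)) []]) []

-- ===== PRECONDITION & SPEC =====
def Spec_broadcast_branches (branches : List (List Int)) (n_branches : Int) (out : List (List Int)) : Prop := out = broadcast_branches_alt branches n_branches
instance (branches : List (List Int)) (n_branches : Int) (out : List (List Int)) : Decidable (Spec_broadcast_branches branches n_branches out) := by unfold Spec_broadcast_branches; infer_instance

-- ===== CLAIM (what is proved, stated in full; the proofs are below) =====
def Claim_equal_broadcast_branches : Prop := ∀ (branches : List (List Int)) (n_branches : Int), Dom_broadcast_branches branches n_branches → Spec_broadcast_branches branches n_branches (broadcast_branches branches n_branches)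

-- ===== LEMMAS AND PROOFS =====

-- ===== VERDICT (by name: the statement is the Claim_ definition above) =====
-- B as a map over range(n_branches)
theorem alt_eq_map (branches : List (List Int)) (n : Int) :
    broadcast_branches_alt branches n =
      (List.range (n - 0).toNat).map (fun (k : Nat) =>
        if branches = [] then ([] : List Int)
        else PySem.List.pyGetD branches (min ((0:Int) + (k:Int)) ((branches.length : Int) - 1)) []) := by
  unfold broadcast_branches_alt
  rw [PySem.List.foldl_append_singleton_eq_map, PySem.List.pyRange_one, List.map_map,
    List.nil_append]
  rfl

theorem broadcast_branches_spec : Claim_equal_broadcast_branches := by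
  intro branches n _
  unfold Spec_broadcast_branches
  rw [alt_eq_map]
  unfold broadcast_branches
  by_cases hn : n ≤ 0
  · rw [show (n - 0).toNat = 0 by omega]
    simp [hn]
  · simp only [if_neg (by omega : ¬ n ≤ 0)]
    by_cases hb : branches = []
    · simp [hb, PySem.List.pyRange_one, List.map_map, Function.comp_def, List.map_const']
    · simp only [if_neg hb]
      have hlen : 0 < branches.length := List.length_pos_iff.mpr hb
      by_cases hge : (branches.length : Int) ≥ n
      · simp only [if_pos hge]
        rw [PySem.List.slice_to branches (by omega : (0:Int) ≤ n)]
        apply List.ext_getElem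
        · simp; omega
        · intro k h1 h2
          have hk : k < n.toNat := by simp at h1; omega
          have hkl : k < branches.length := by omega
          simp only [List.getElem_take, List.getElem_map, List.getElem_range]
          have hmin : min ((0:Int) + (k : Int)) ((branches.length : Int) - 1) = (k : Int) := by
            omega
          rw [hmin, PySem.List.pyGetD_eq_getElem branches ([] : List Int) (by omega)
            (by omega)]
          simp
      · simp only [if_neg hge]
        have hlt : (branches.length : Int) < n := by omega
        have hlast := PySem.List.pyGetD_neg_natCast branches 1 ([] : List Int)
          (by omega) (by omega)
        norm_num at hlast
        apply List.ext_getElem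
        · simp; omega
        · intro k h1 h2
          have hk2 : k < (n - 0).toNat := by simp at h2; omega
          simp only [List.getElem_map, List.getElem_range]
          by_cases hk : k < branches.length
          · rw [List.getElem_append_left hk]
            have hmin : min ((0:Int) + (k : Int)) ((branches.length : Int) - 1) = (k : Int) := by
              omega
            rw [hmin, PySem.List.pyGetD_eq_getElem branches ([] : List Int) (by omega)
              (by omega)]
            simp
          · rw [List.getElem_append_right (by omega), List.getElem_replicate, hlast]
            have hmin : min ((0:Int) + (k : Int)) ((branches.length : Int) - 1)
                = (branches.length : Int) - 1 := by omega
            rw [hmin, PySem.List.pyGetD_eq_getElem branches ([] : List Int) (by omega)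
              (by omega)]
            congr 1
            omega
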